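-- pv_equiv track=rewrite | github.com/algorithm-study-2021/Algorithm_Study_2021 | 김하영/week10.py | solution
-- ===== SOURCE A (Python) =====
-- def solution(numbers):
--     answer = []
--     for number in numbers:
--         x = tobinary(number)
--         if len(x) == 0: #0인 경우
--             answer.append(1)
--         elif len(x) == 1: #1인 경우
--             answer.append(2)
--         else: #그 외 숫자
--             if x[-1] =='0':
--                 x = x[:-1] + '1'
--             elif x[-2]+x[-1] == '01':
--                 x = x[:-2] + '10'
--             else:
--                 x = '0' + x
--                 index = x.rfind('0')
--                 x = x[:index] + '10' + x[index+2:]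
--             answer.append(frombinary(x))
--     return answer
--
-- def tobinary(n): #이진수로
--     answer = ''
--     while n!=0:
--         answer = str(n%2) + answer
--         n = n//2
--     return answer
--
-- def frombinary(n): #십진수로
--     answer = 0
--     for i in range(len(n)):
--         answer += int(n[-(i+1)])*(2**i)
--     return answer
-- ===== SOURCE B (Python) =====
-- def solution(numbers):
--     answer = []
--     for n in numbers:
--         if n % 4 == 3:
--             m, t = n, 0
--             while m % 2 == 1:
--                 m //= 2
--                 t += 1
--             answer.append(n + 2 ** (t - 1))
--         else:
--             answer.append(n + 1)
--     return answer
-- ===== Notes on version B (the rewrite author's own statement) =====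
-- stated objective: simpler
-- what changed: A converts each number to a binary string, edits the string (flip last '0', swap a trailing '01', or rewrite around the last '0') and parses it back; B appends n+1 directly, except for n % 4 == 3 where it counts n's trailing one-bits t with a halving loop and appends n + 2**(t-1), with no string conversion at all.
import Mathlib
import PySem

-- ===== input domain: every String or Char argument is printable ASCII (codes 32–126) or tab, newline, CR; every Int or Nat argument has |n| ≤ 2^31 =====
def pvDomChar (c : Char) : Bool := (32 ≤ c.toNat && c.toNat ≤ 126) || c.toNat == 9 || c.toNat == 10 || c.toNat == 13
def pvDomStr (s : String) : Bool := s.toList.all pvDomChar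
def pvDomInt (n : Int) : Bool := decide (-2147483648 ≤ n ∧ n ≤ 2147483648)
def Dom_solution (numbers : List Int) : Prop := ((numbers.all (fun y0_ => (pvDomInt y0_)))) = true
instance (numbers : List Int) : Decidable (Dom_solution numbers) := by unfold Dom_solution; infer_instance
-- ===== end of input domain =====

-- B replaces A's binary-string building and re-parsing with per-element integer arithmetic
-- (n+1, except n % 4 == 3 which adds 2^(trailing-ones - 1)); objective: simpler.

-- ===== PORT A =====
-- Python str values are ported as List Char (PySem.Chars is the definition layer of PySem.Str).
-- 'while n != 0: n = n // 2' runs at most n.toNat times on the admitted (non-negative) inputs,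
-- so fuel n.toNat + 1 only makes the loop total; it never cuts it short there.
def tobinaryAux : Nat → Int → List Char → List Char
  | 0, _, acc => acc
  | fuel + 1, n, acc =>
      if n = 0 then acc
      else tobinaryAux fuel (PySem.Int.floordiv n 2) (PySem.Int.toChars (PySem.Int.mod n 2) ++ acc)

def tobinary (n : Int) : List Char := tobinaryAux (n.toNat + 1) n []

def frombinary (s : List Char) : Int :=
  (PySem.List.pyRange 0 (PySem.List.len s) 1).foldl
    (fun answer i =>
      answer + (PySem.Int.ofChars? [PySem.List.pyGetD s (-(i + 1)) ' ']).getD 0 * 2 ^ i.toNat) 0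

-- the body of A's 'for number in numbers' loop
def stepA (answer : List Int) (number : Int) : List Int :=
  let x := tobinary number
  if PySem.List.len x = 0 then answer ++ [1]
  else if PySem.List.len x = 1 then answer ++ [2]
  else if PySem.List.pyGetD x (-1) ' ' = '0' then
    answer ++ [frombinary (PySem.List.slice x none (some (-1)) ++ ['1'])]
  else if [PySem.List.pyGetD x (-2) ' ', PySem.List.pyGetD x (-1) ' '] = ['0', '1'] then
    answer ++ [frombinary (PySem.List.slice x none (some (-2)) ++ ['1', '0'])]
  else
    -- Python's locals x3 = '0' + x and index = x3.rfind('0') are inlined here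
    answer ++ [frombinary (PySem.List.slice ('0' :: x) none (some (PySem.Chars.rfind ('0' :: x) ['0'])) ++ ['1', '0'] ++
                            PySem.List.slice ('0' :: x) (some (PySem.Chars.rfind ('0' :: x) ['0'] + 2)) none)]

def solution (numbers : List Int) : List Int := numbers.foldl stepA []

-- ===== PORT B =====
-- 'while m % 2 == 1: m //= 2; t += 1' halves m each step, so fuel m.toNat + 1 only makes it total
-- on the admitted (non-negative) inputs.
def trailingLoop : Nat → Int → Int → Int × Int
  | 0, m, t => (m, t)
  | fuel + 1, m, t =>
      if PySem.Int.mod m 2 = 1 then trailingLoop fuel (PySem.Int.floordiv m 2) (t + 1)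
      else (m, t)

-- the body of B's 'for n in numbers' loop
def stepB (answer : List Int) (n : Int) : List Int :=
  if PySem.Int.mod n 4 = 3 then
    answer ++ [n + 2 ^ ((trailingLoop (n.toNat + 1) n 0).2 - 1).toNat]
  else
    answer ++ [n + 1]

def solution_alt (numbers : List Int) : List Int := numbers.foldl stepB []

-- ===== PRECONDITION & SPEC =====
-- A's tobinary ('while n != 0: n = n // 2') never terminates for a negative n (and B's while loop
-- likewise diverges there), so A returns exactly on lists of non-negative integers; Pre_ excludes
-- only those divergent inputs.
def Pre_solution (numbers : List Int) : Prop := ∀ n ∈ numbers, 0 ≤ n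
instance (numbers : List Int) : Decidable (Pre_solution numbers) := by unfold Pre_solution; infer_instance

def pvWitness_solution : List Int := [0, 1, 2, 3, 4, 7, 11, 2147483647]

def Spec_solution (numbers : List Int) (out : List Int) : Prop := out = solution_alt numbers
instance (numbers : List Int) (out : List Int) : Decidable (Spec_solution numbers out) := by unfold Spec_solution; infer_instance

-- ===== CLAIM (what is proved, stated in full; the proofs are below) =====
def Claim_equal_solution : Prop := ∀ (numbers : List Int), Dom_solution numbers → Pre_solution numbers → Spec_solution numbers (solution numbers)

-- ===== LEMMAS AND PROOFS =====

def bd (c : Char) : Nat := if c = '1' then 1 else 0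
def val (l : List Char) : Nat := l.foldl (fun a c => 2 * a + bd c) 0
def bin : Nat → List Char
  | 0 => []
  | (m + 1) => bin ((m + 1) / 2) ++ [if (m + 1) % 2 = 1 then '1' else '0']
  decreasing_by exact Nat.div_lt_self (Nat.succ_pos m) (by norm_num)

lemma bin_eq (m : Nat) (hm : 1 ≤ m) :
    bin m = bin (m / 2) ++ [if m % 2 = 1 then '1' else '0'] := by
  obtain ⟨k, rfl⟩ := Nat.exists_eq_add_of_le hm
  simp [bin, Nat.add_comm 1 k]

lemma val_foldl (l : List Char) (a : Nat) :
    l.foldl (fun a c => 2 * a + bd c) a = a * 2 ^ l.length + val l := by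
  induction l generalizing a with
  | nil => simp [val]
  | cons c l ih =>
      simp only [List.foldl_cons, List.length_cons, val]
      rw [ih (2 * a + bd c), ih (2 * 0 + bd c)]
      ring

lemma val_append (u v : List Char) : val (u ++ v) = val u * 2 ^ v.length + val v := by
  simp only [val, List.foldl_append]
  rw [val_foldl v (u.foldl _ 0)]; rfl

lemma val_cons (c : Char) (l : List Char) : val (c :: l) = bd c * 2 ^ l.length + val l := by
  have h := val_append [c] l
  simpa [val, bd] using h

lemma val_replicate_one (t : Nat) : val (List.replicate t '1') = 2 ^ t - 1 := by
  induction t with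
  | zero => rfl
  | succ t ih =>
      rw [List.replicate_succ, val_cons, ih]
      simp only [List.length_replicate, bd, if_true]
      have : 1 ≤ 2 ^ t := Nat.one_le_two_pow
      omega

lemma bin_chars (m : Nat) : ∀ c ∈ bin m, c = '0' ∨ c = '1' := by
  induction m using Nat.strong_induction_on with
  | _ m ih =>
      match m with
      | 0 => simp [bin]
      | (k + 1) =>
          rw [bin_eq (k+1) (by omega)]
          intro c hc
          rcases List.mem_append.1 hc with h | h
          · exact ih _ (Nat.div_lt_self (by omega) (by norm_num)) c h
          · simp only [List.mem_singleton] at h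
            subst h; split <;> simp

lemma val_bin (m : Nat) : val (bin m) = m := by
  induction m using Nat.strong_induction_on with
  | _ m ih =>
      match m with
      | 0 => simp [bin, val]
      | (k + 1) =>
          rw [bin_eq (k+1) (by omega), val_append, ih _ (Nat.div_lt_self (by omega) (by norm_num))]
          rcases Nat.mod_two_eq_zero_or_one (k+1) with h | h <;>
            simp [h, val, bd] <;> omega

lemma tobinaryAux_eq (fuel : Nat) (m : Nat) (acc : List Char) (h : m < fuel) :
    tobinaryAux fuel (m : Int) acc = bin m ++ acc := by
  induction fuel generalizing m acc with
  | zero => omega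
  | succ fuel ih =>
      by_cases hm : m = 0
      · subst hm; simp [tobinaryAux, bin]
      · rw [tobinaryAux]
        rw [if_neg (by exact_mod_cast hm)]
        rw [show ((2:Int)) = ((2:Nat):Int) from rfl,
            PySem.Int.floordiv_natCast m 2, PySem.Int.mod_natCast m 2]
        rw [ih (m / 2) _ (by omega)]
        rw [bin_eq m (by omega)]
        rcases Nat.mod_two_eq_zero_or_one m with h2 | h2
        · simp only [h2, Nat.cast_zero]
          rw [show PySem.Int.toChars 0 = ['0'] from by decide]
          simp
        · simp only [h2, Nat.cast_one]
          rw [show PySem.Int.toChars 1 = ['1'] from by decide]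
          simp

lemma sum_bits (l : List Char) :
    ((List.range l.length).map (fun k => ((bd (l.getD (l.length - 1 - k) ' ') : Int) * 2 ^ k))).sum
      = (val l : Int) := by
  induction l with
  | nil => simp [val]
  | cons c l ih =>
      rw [List.length_cons, List.range_succ, List.map_append, List.sum_append]
      have h1 : ∀ k ∈ List.range l.length,
          ((c :: l).getD (l.length + 1 - 1 - k) ' ') = l.getD (l.length - 1 - k) ' ' := by
        intro k hk
        simp only [List.mem_range] at hk
        have e : l.length + 1 - 1 - k = (l.length - 1 - k) + 1 := by omega
        rw [e, List.getD_cons_succ]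
      rw [List.map_congr_left (fun k hk => by rw [h1 k hk])]
      rw [ih]
      simp only [List.map_singleton, List.sum_singleton]
      have h2 : (c :: l).getD (l.length + 1 - 1 - l.length) ' ' = c := by
        simp
      rw [h2, val_cons]
      push_cast
      ring

lemma frombinary_val (l : List Char) (h : ∀ c ∈ l, c = '0' ∨ c = '1') :
    frombinary l = (val l : Int) := by
  unfold frombinary
  rw [PySem.List.len_eq, PySem.List.pyRange_one, List.foldl_map, PySem.List.foldl_add]
  rw [← sum_bits l]
  rw [zero_add]
  apply congrArg
  apply List.map_congr_left
  intro k hk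
  simp only [List.mem_range] at hk
  have hneg : -((0 : Int) + (k : Int) + 1) = -(((k + 1 : Nat) : Int)) := by push_cast; ring
  rw [hneg, PySem.List.pyGetD_neg_natCast l (k + 1) ' ' (by omega) (by omega)]
  have hmem : l[l.length - (k + 1)] ∈ l := List.getElem_mem _
  have hget : l.getD (l.length - 1 - k) ' ' = l[l.length - (k + 1)] := by
    rw [List.getD_eq_getElem l ' ' (by omega)]
    congr 1
    omega
  rw [hget]
  have htoNat : ((0 : Int) + (k : Int)).toNat = k := by omega
  rw [htoNat]
  have e0 : (PySem.Int.ofChars? ['0']).getD 0 = 0 := by decide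
  have e1 : (PySem.Int.ofChars? ['1']).getD 0 = 1 := by decide
  rcases h _ hmem with hc | hc <;> rw [hc] <;> simp [e0, e1, bd]

lemma rfind_go_spec (s sub : List Char) (p k : Nat)
    (hp : sub.isPrefixOf (s.drop p) = true)
    (hk : ∀ j, p < j → j ≤ p + k → sub.isPrefixOf (s.drop j) = false) :
    PySem.Chars.rfind.go s sub (p + k) = (p : Int) := by
  induction k with
  | zero =>
      cases p with
      | zero =>
          rw [show PySem.Chars.rfind.go s sub (0 + 0) =
            (if sub.isPrefixOf s = true then (0 : Int) else -1) from rfl]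
          rw [List.drop_zero] at hp
          rw [if_pos hp]; simp
      | succ j =>
          rw [show PySem.Chars.rfind.go s sub (j + 1 + 0) =
            (if sub.isPrefixOf (List.drop (j + 1) s) = true then ((j : Nat) + 1 : Int)
             else PySem.Chars.rfind.go s sub j) from rfl]
          rw [if_pos hp]
          push_cast
          ring
  | succ k ih =>
      have hpk : p + (k + 1) = (p + k) + 1 := by omega
      rw [hpk]
      rw [show PySem.Chars.rfind.go s sub ((p + k) + 1) =
        (if sub.isPrefixOf (List.drop ((p + k) + 1) s) = true then ((p + k : Nat) + 1 : Int)
         else PySem.Chars.rfind.go s sub (p + k)) from rfl]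
      rw [if_neg (by rw [hk ((p+k)+1) (by omega) (by omega)]; simp)]
      exact ih (fun j h1 h2 => hk j h1 (by omega))

lemma rfind_last_zero (u : List Char) (t : Nat) :
    PySem.Chars.rfind (u ++ '0' :: List.replicate t '1') ['0'] = (u.length : Int) := by
  have hlen : (u ++ '0' :: List.replicate t '1').length = u.length + (t + 1) := by simp
  have hp : (['0'] : List Char).isPrefixOf ((u ++ '0' :: List.replicate t '1').drop u.length) = true := by
    rw [List.drop_append_of_le_length (by omega), List.drop_length]
    simp [List.isPrefixOf]
  have hk : ∀ j, u.length < j → j ≤ u.length + (t + 1) →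
      (['0'] : List Char).isPrefixOf ((u ++ '0' :: List.replicate t '1').drop j) = false := by
    intro j h1 h2
    obtain ⟨i, rfl⟩ : ∃ i, j = u.length + 1 + i := ⟨j - u.length - 1, by omega⟩
    rw [show u ++ '0' :: List.replicate t '1' = (u ++ ['0']) ++ List.replicate t '1' by simp]
    rw [show u.length + 1 + i = (u ++ ['0']).length + i by simp]
    rw [List.drop_length_add_append]
    rw [List.drop_replicate]
    cases h : t - i with
    | zero => decide
    | succ w => simp [List.replicate_succ, List.isPrefixOf]
  have := rfind_go_spec (u ++ '0' :: List.replicate t '1') ['0'] u.length (t + 1) hp hk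
  unfold PySem.Chars.rfind
  rw [hlen, this]

lemma odd_decomp (m : Nat) (h : m % 2 = 1) :
    ∃ t q, 1 ≤ t ∧ q % 2 = 0 ∧ m = q * 2 ^ t + (2 ^ t - 1) := by
  induction m using Nat.strong_induction_on with
  | _ m ih =>
      have hm1 : 1 ≤ m := by omega
      set u := m / 2 with hu
      have hmu : m = 2 * u + 1 := by omega
      rcases Nat.mod_two_eq_zero_or_one u with he | ho
      · exact ⟨1, u, by omega, he, by omega⟩
      · obtain ⟨t, q, ht, hq, hdec⟩ := ih u (by omega) ho
        refine ⟨t + 1, q, by omega, hq, ?_⟩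
        have h2 : 1 ≤ 2 ^ t := Nat.one_le_two_pow
        have h3 : q * 2 ^ (t + 1) = 2 * (q * 2 ^ t) := by ring
        have h4 : (2:Nat) ^ (t + 1) = 2 * 2 ^ t := by ring
        omega

lemma bin_decomp (q t : Nat) : bin (q * 2 ^ t + (2 ^ t - 1)) = bin q ++ List.replicate t '1' := by
  induction t with
  | zero => simp
  | succ t ih =>
      have h2 : 1 ≤ 2 ^ t := Nat.one_le_two_pow
      have hm : q * 2 ^ (t + 1) + (2 ^ (t + 1) - 1) =
          2 * (q * 2 ^ t + (2 ^ t - 1)) + 1 := by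
        have h3 : q * 2 ^ (t + 1) = 2 * (q * 2 ^ t) := by ring
        have h4 : (2:Nat) ^ (t + 1) = 2 * 2 ^ t := by ring
        omega
      rw [hm, bin_eq _ (by omega)]
      have hdiv : (2 * (q * 2 ^ t + (2 ^ t - 1)) + 1) / 2 = q * 2 ^ t + (2 ^ t - 1) := by omega
      have hmod : (2 * (q * 2 ^ t + (2 ^ t - 1)) + 1) % 2 = 1 := by omega
      rw [hdiv, hmod, ih]
      simp [List.replicate_succ']

lemma trailingLoop_spec (t : Nat) : ∀ (fuel : Nat) (q : Nat) (acc : Int), q % 2 = 0 → t < fuel →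
    trailingLoop fuel ((q * 2 ^ t + (2 ^ t - 1) : Nat) : Int) acc = ((q : Int), acc + t) := by
  induction t with
  | zero =>
      intro fuel q acc hq hf
      match fuel with
      | w + 1 =>
        rw [trailingLoop]
        simp only [pow_zero]
        rw [if_neg (by
          rw [show ((q * 1 + (1 - 1) : Nat) : Int) = ((q : Nat) : Int) by push_cast; omega]
          rw [show (2:Int) = ((2:Nat):Int) from rfl, PySem.Int.mod_natCast q 2, hq]
          simp)]
        simp
  | succ t ih =>
      intro fuel q acc hq hf
      match fuel with
      | w + 1 =>
        have h2 : 1 ≤ 2 ^ t := Nat.one_le_two_pow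
        have hm : q * 2 ^ (t + 1) + (2 ^ (t + 1) - 1) =
            2 * (q * 2 ^ t + (2 ^ t - 1)) + 1 := by
          have h3 : q * 2 ^ (t + 1) = 2 * (q * 2 ^ t) := by ring
          have h4 : (2:Nat) ^ (t + 1) = 2 * 2 ^ t := by ring
          omega
        rw [trailingLoop, hm]
        rw [if_pos (by
          rw [show (2:Int) = ((2:Nat):Int) from rfl, PySem.Int.mod_natCast _ 2]
          omega)]
        rw [show (2:Int) = ((2:Nat):Int) from rfl, PySem.Int.floordiv_natCast _ 2]
        rw [show (2 * (q * 2 ^ t + (2 ^ t - 1)) + 1) / 2 = q * 2 ^ t + (2 ^ t - 1) by omega]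
        rw [ih w q (acc + 1) hq (by omega)]
        refine congrArg _ ?_
        push_cast
        ring

lemma tobinary_eq (m : Nat) : tobinary (m : Int) = bin m := by
  unfold tobinary
  rw [Int.toNat_natCast]
  simpa using tobinaryAux_eq (m + 1) m [] (by omega)

lemma pyGetD_penult (u : List Char) (a b d : Char) :
    PySem.List.pyGetD (u ++ [a, b]) (-2) d = a := by
  rw [PySem.List.pyGetD_neg_ofNat (u ++ [a, b]) 2 d (by omega) (by simp)]
  simp [List.getElem_append_right]

lemma bin_ne_nil (m : Nat) (h : 1 ≤ m) : bin m ≠ [] := by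
  rw [bin_eq m h]; simp

lemma step_eq_ge2 (answer : List Int) (m : Nat) (h2 : 2 ≤ m) :
    stepA answer (m : Int) = stepB answer (m : Int) := by
  have hmod4 : PySem.Int.mod (m : Int) 4 = ((m % 4 : Nat) : Int) := by
    rw [show (4:Int) = ((4:Nat):Int) from rfl, PySem.Int.mod_natCast]
  have htob : tobinary (m : Int) = bin m := tobinary_eq m
  rcases Nat.mod_two_eq_zero_or_one m with heven | hodd
  · -- even: both sides give m + 1
    have hb : bin m = bin (m / 2) ++ ['0'] := by
      rw [bin_eq m (by omega)]; simp [heven]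
    have hL : 1 ≤ (bin (m / 2)).length :=
      List.length_pos_iff.2 (bin_ne_nil (m / 2) (by omega))
    rw [stepA, stepB, htob, hb]
    rw [if_neg (by simp only [PySem.List.len_eq, List.length_append, List.length_singleton]; omega)]
    rw [if_neg (by simp only [PySem.List.len_eq, List.length_append, List.length_singleton]; omega)]
    rw [if_pos (PySem.List.pyGetD_neg_one_append_singleton (bin (m / 2)) '0' ' ')]
    rw [if_neg (by rw [hmod4]; intro hc; exact absurd (by exact_mod_cast hc : m % 4 = 3) (by omega))]
    rw [PySem.List.slice_to_neg_one, List.dropLast_concat]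
    rw [frombinary_val _ (by
      intro c hc
      rcases List.mem_append.1 hc with h | h
      · exact bin_chars _ c h
      · simp only [List.mem_singleton] at h; right; exact h)]
    rw [val_append, val_bin]
    have hv1 : val ['1'] = 1 := by decide
    rw [hv1]
    rw [show ((m / 2 * 2 ^ (['1'] : List Char).length + 1 : Nat) : Int) = (m : Int) + 1 from by
      simp only [List.length_singleton, pow_one]; push_cast; omega]
  · have hcases : m % 4 = 1 ∨ m % 4 = 3 := by omega
    rcases hcases with h41 | h43
    · -- m % 4 = 1 : both sides give m + 1
      have h5 : 5 ≤ m := by omega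
      have hb1 : bin (m / 2) = bin (m / 4) ++ ['0'] := by
        rw [bin_eq (m / 2) (by omega)]
        have hq : m / 2 % 2 = 0 := by omega
        have hdd : m / 2 / 2 = m / 4 := by omega
        simp [hq, hdd]
      have hb : bin m = (bin (m / 4) ++ ['0']) ++ ['1'] := by
        rw [bin_eq m (by omega)]
        simp [hodd, hb1]
      rw [stepA, stepB, htob, hb]
      rw [if_neg (by simp only [PySem.List.len_eq, List.length_append, List.length_singleton]; omega)]
      rw [if_neg (by simp only [PySem.List.len_eq, List.length_append, List.length_singleton]; omega)]
      rw [if_neg (by rw [PySem.List.pyGetD_neg_one_append_singleton]; simp)]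
      rw [if_pos (by
        rw [PySem.List.pyGetD_neg_one_append_singleton, List.append_assoc,
          show (['0'] ++ ['1'] : List Char) = ['0', '1'] from rfl,
          pyGetD_penult (bin (m / 4)) '0' '1' ' ']
        )]
      rw [if_neg (by rw [hmod4]; intro hc; exact absurd (by exact_mod_cast hc : m % 4 = 3) (by omega))]
      rw [PySem.List.slice_to_neg_ofNat _ 2 (by omega)]
      rw [show ((bin (m / 4) ++ ['0']) ++ ['1']).length - 2 = (bin (m / 4)).length by
        simp only [List.length_append, List.length_singleton]; omega]
      rw [List.append_assoc, List.take_left]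
      rw [frombinary_val _ (by
        intro c hc
        rcases List.mem_append.1 hc with h | h
        · exact bin_chars _ c h
        · simp only [List.mem_cons] at h
          rcases h with h | h
          · right; exact h
          · rcases h with h | h
            · left; exact h
            · exact absurd h (by simp))]
      rw [val_append, val_bin]
      rw [show val ['1', '0'] = 2 from by decide]
      rw [show ((m / 4 * 2 ^ (['1', '0'] : List Char).length + 2 : Nat) : Int) = (m : Int) + 1 from by
        rw [show (['1', '0'] : List Char).length = 2 from rfl,
          show (2:Nat) ^ 2 = 4 from by norm_num]
        push_cast; omega]
    · -- m % 4 = 3 : both sides give m + 2^(t-1)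
      obtain ⟨t, q, ht1, hq, hdec⟩ := odd_decomp m (by omega)
      have ht2 : 2 ≤ t := by
        rcases Nat.lt_or_ge t 2 with h | h
        · exfalso
          have ht : t = 1 := by omega
          subst ht
          norm_num at hdec
          omega
        · exact h
      have hp1 : 1 ≤ 2 ^ (t - 1) := Nat.one_le_two_pow
      have h2t : (2:Nat) ^ t = 2 * 2 ^ (t - 1) := by
        conv_lhs => rw [show t = (t - 1) + 1 by omega]
        rw [pow_succ]; ring
      have h2t1 : (2:Nat) ^ (t + 1) = 4 * 2 ^ (t - 1) := by
        conv_lhs => rw [show t + 1 = (t - 1) + 2 by omega]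
        rw [pow_add]; ring
      have hlt : t < 2 ^ t := Nat.lt_two_pow_self
      have hbm : bin m = bin q ++ List.replicate t '1' := by rw [hdec]; exact bin_decomp q t
      obtain ⟨u, hu, hvu, hcu⟩ :
          ∃ u : List Char, '0' :: bin q = u ++ ['0'] ∧ val u = q / 2 ∧ (∀ c ∈ u, c = '0' ∨ c = '1') := by
        rcases Nat.eq_zero_or_pos q with hq0 | hqpos
        · exact ⟨[], by simp [hq0, bin], by simp [val]; omega, by simp⟩
        · have hbq : bin q = bin (q / 2) ++ ['0'] := by
            rw [bin_eq q (by omega)]; simp [Nat.mod_two_ne_one.2 (by omega)]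
          refine ⟨'0' :: bin (q / 2), by simp [hbq], ?_, ?_⟩
          · rw [val_cons, val_bin]; simp [bd]
          · intro c hc
            rcases List.mem_cons.1 hc with h | h
            · left; exact h
            · exact bin_chars _ c h
      have hx3 : '0' :: (bin q ++ List.replicate t '1') = u ++ '0' :: List.replicate t '1' := by
        rw [← List.cons_append, hu, List.append_assoc]; rfl
      have htl : trailingLoop ((m : Int).toNat + 1) (m : Int) 0 = ((q : Int), 0 + (t : Int)) := by
        rw [Int.toNat_natCast]
        conv_lhs => rw [hdec]
        exact trailingLoop_spec t _ q 0 hq (by omega)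
      have hrep1 : bin q ++ List.replicate t '1' =
          (bin q ++ List.replicate (t - 1) '1') ++ ['1'] := by
        rw [List.append_assoc, ← List.replicate_succ',
          show (t - 1) + 1 = t by omega]
      have hrep2 : bin q ++ List.replicate t '1' =
          (bin q ++ List.replicate (t - 2) '1') ++ ['1', '1'] := by
        rw [List.append_assoc, show (['1', '1'] : List Char) = List.replicate 2 '1' from rfl,
          ← List.replicate_add, show (t - 2) + 2 = t by omega]
      rw [stepA, stepB, htob, hbm]
      rw [if_neg (by simp only [PySem.List.len_eq, List.length_append, List.length_replicate]; omega)]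
      rw [if_neg (by simp only [PySem.List.len_eq, List.length_append, List.length_replicate]; omega)]
      rw [if_neg (by rw [hrep1, PySem.List.pyGetD_neg_one_append_singleton]; simp)]
      rw [if_neg (by rw [hrep2, pyGetD_penult]; simp)]
      rw [if_pos (by rw [hmod4, h43]; norm_num)]
      rw [hx3, rfind_last_zero u t]
      rw [PySem.List.slice_to_natCast, List.take_left]
      rw [show ((u.length : Int) + 2) = ((u.length + 2 : Nat) : Int) by push_cast; ring]
      rw [PySem.List.slice_from_natCast]
      rw [show (u ++ '0' :: List.replicate t '1').drop (u.length + 2) = List.replicate (t - 1) '1' from by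
        rw [show u ++ '0' :: List.replicate t '1' = (u ++ ['0']) ++ List.replicate t '1' by simp,
          show u.length + 2 = (u ++ ['0']).length + 1 by simp,
          List.drop_length_add_append, List.drop_replicate]]
      rw [htl]
      rw [frombinary_val _ (by
        intro c hc
        rcases List.mem_append.1 hc with h | h
        · rcases List.mem_append.1 h with h | h
          · exact hcu c h
          · rcases List.mem_cons.1 h with h | h
            · right; exact h
            · left; simpa using h
        · right; exact List.eq_of_mem_replicate h)]
      rw [val_append, val_append, hvu, val_replicate_one]
      rw [show val ['1', '0'] = 2 from by decide]
      obtain ⟨qh, rfl⟩ : ∃ qh, q = 2 * qh := ⟨q / 2, by omega⟩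
      rw [show 2 * qh / 2 = qh by omega]
      rw [show (['1', '0'] : List Char).length = 2 from rfl, List.length_replicate]
      rw [show ((((2 * qh : Nat) : Int), 0 + (t : Int)).2) = 0 + (t : Int) from rfl]
      rw [show ((0 : Int) + (t : Int) - 1).toNat = t - 1 by omega]
      rw [show ((qh * 2 ^ 2 + 2) * 2 ^ (t - 1) + (2 ^ (t - 1) - 1) : Nat)
            = (2 * qh * 2 ^ t + (2 ^ t - 1)) + 2 ^ (t - 1) from by
        have e1 : (qh * 2 ^ 2 + 2) * 2 ^ (t - 1) = 4 * (qh * 2 ^ (t - 1)) + 2 * 2 ^ (t - 1) := by ring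
        have e2 : 2 * qh * 2 ^ t = 4 * (qh * 2 ^ (t - 1)) := by rw [h2t]; ring
        omega]
      rw [← hdec]
      push_cast
      rfl

lemma step_eq (answer : List Int) (n : Int) (hn : 0 ≤ n) : stepA answer n = stepB answer n := by
  obtain ⟨m, rfl⟩ : ∃ m : Nat, n = (m : Int) := ⟨n.toNat, (Int.toNat_of_nonneg hn).symm⟩
  have hmod4 : PySem.Int.mod (m : Int) 4 = ((m % 4 : Nat) : Int) := by
    rw [show (4:Int) = ((4:Nat):Int) from rfl, PySem.Int.mod_natCast]
  match m with
  | 0 =>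
      have h0 : tobinary ((0:Nat) : Int) = [] := by rw [tobinary_eq]; simp [bin]
      rw [stepA, stepB, hmod4]
      simp only [Nat.cast_zero] at h0 ⊢
      simp [h0]
  | 1 =>
      have h1 : tobinary ((1:Nat) : Int) = ['1'] := by rw [tobinary_eq]; simp [bin]
      rw [stepA, stepB, hmod4]
      simp only [Nat.cast_one] at h1 ⊢
      simp [h1]
  | (k + 2) => exact step_eq_ge2 answer (k + 2) (by omega)

-- ===== VERDICT (by name: the statement is the Claim_ definition above) =====
theorem solution_spec : Claim_equal_solution := by
  intro numbers hdom hpre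
  unfold Spec_solution solution solution_alt
  induction numbers using List.reverseRecOn with
  | nil => rfl
  | append_singleton l n ih =>
      have hdoml : Dom_solution l := by
        unfold Dom_solution at hdom ⊢
        rw [List.all_append] at hdom
        exact ((Bool.and_eq_true _ _).mp hdom).1
      rw [List.foldl_append, List.foldl_append,
        ih hdoml (fun x hx => hpre x (by simp [hx]))]
      exact step_eq _ n (hpre n (by simp))
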